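-- pv_equiv track=rewrite | github.com/Moonraker-AI/moonraker-agent | utils/astro_tokens.py | render_override_css
-- ===== SOURCE A (Python) =====
-- def render_override_css(overrides: dict[str, str]) -> str:
--     """Render the overrides dict to a stable CSS string.
--
--     Variables NOT in overrides keep their value from tokens.css (neutral
--     system defaults). The migration template has been depoinionated so a
--     sparse override file does NOT paint Moonraker brand.
--     """
--     if not overrides:
--         return (
--             "/* No per-site overrides — neutral template defaults stand. */\n"
--             ":root {}\n"
--         )
--
--     lines = [
--         "/* Auto-generated by agent.astro_tokens — derived from captured styles.json. */",
--         "/* Variables NOT listed here keep their value from tokens.css (neutral defaults). */",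
--         ":root {",
--     ]
--     # Stable ordering for diff readability
--     order = [
--         # Color
--         "--color-primary", "--color-primary-text",
--         "--color-bg", "--color-bg-alt",
--         "--color-text", "--color-muted", "--color-border",
--         "--color-link", "--color-link-hover",
--         # Typography
--         "--font-display", "--font-body",
--         "--type-scale-h1", "--type-scale-h2", "--type-scale-h3",
--         "--type-scale-h4", "--type-scale-h5", "--type-scale-h6",
--         "--type-scale-body",
--         "--type-weight-display", "--type-weight-body",
--         "--type-leading-tight", "--type-leading-normal",
--         "--type-tracking-tight", "--type-tracking-normal",
--         # Spacing
--         "--spacing-section",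
--         # Radius
--         "--radius-md", "--radius-lg",
--         # Button
--         "--button-bg", "--button-text",
--         "--button-radius", "--button-padding-x", "--button-padding-y",
--         "--button-font-weight", "--button-text-transform",
--         "--button-letter-spacing",
--         # Nav
--         "--nav-bg", "--nav-text", "--nav-link-color",
--         # Hero
--         "--hero-overlay-color", "--hero-text-color",
--         # Footer
--         "--footer-bg", "--footer-text",
--     ]
--     seen: set[str] = set()
--     for key in order:
--         if key in overrides:
--             lines.append(f"  {key}: {overrides[key]};")
--             seen.add(key)
--     for k, v in overrides.items():
--         if k in seen:
--             continue
--         lines.append(f"  {k}: {v};")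
--     lines.append("}")
--     lines.append("")
--     return "\n".join(lines)
-- ===== SOURCE B (Python) =====
-- _HEADER = [
--     "/* Auto-generated by agent.astro_tokens — derived from captured styles.json. */",
--     "/* Variables NOT listed here keep their value from tokens.css (neutral defaults). */",
--     ":root {",
-- ]
--
-- _ORDER = [
--     "--color-primary", "--color-primary-text",
--     "--color-bg", "--color-bg-alt",
--     "--color-text", "--color-muted", "--color-border",
--     "--color-link", "--color-link-hover",
--     "--font-display", "--font-body",
--     "--type-scale-h1", "--type-scale-h2", "--type-scale-h3",
--     "--type-scale-h4", "--type-scale-h5", "--type-scale-h6",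
--     "--type-scale-body",
--     "--type-weight-display", "--type-weight-body",
--     "--type-leading-tight", "--type-leading-normal",
--     "--type-tracking-tight", "--type-tracking-normal",
--     "--spacing-section",
--     "--radius-md", "--radius-lg",
--     "--button-bg", "--button-text",
--     "--button-radius", "--button-padding-x", "--button-padding-y",
--     "--button-font-weight", "--button-text-transform",
--     "--button-letter-spacing",
--     "--nav-bg", "--nav-text", "--nav-link-color",
--     "--hero-overlay-color", "--hero-text-color",
--     "--footer-bg", "--footer-text",
-- ]
--
--
-- def render_override_css(overrides: dict[str, str]) -> str:
--     """Render the overrides dict to a stable CSS string (single sorted pass)."""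
--     if not overrides:
--         return (
--             "/* No per-site overrides — neutral template defaults stand. */\n"
--             ":root {}\n"
--         )
--     rank = {k: i for i, k in enumerate(_ORDER)}
--     known = sorted((k for k in overrides if k in rank), key=rank.__getitem__)
--     rest = [k for k in overrides if k not in rank]
--     body = [f"  {k}: {overrides[k]};" for k in known + rest]
--     return "\n".join(_HEADER + body + ["}", ""])
-- ===== Notes on version B (the rewrite author's own statement) =====
-- stated objective: idiomatic
-- what changed: A's two sequential emit loops with a mutable 'seen' set are replaced by a filter/sort pipeline: known keys are sorted by a rank table built from the order list, unknown keys are kept in insertion order, and the body is one comprehension over their concatenation.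
import Mathlib
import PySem

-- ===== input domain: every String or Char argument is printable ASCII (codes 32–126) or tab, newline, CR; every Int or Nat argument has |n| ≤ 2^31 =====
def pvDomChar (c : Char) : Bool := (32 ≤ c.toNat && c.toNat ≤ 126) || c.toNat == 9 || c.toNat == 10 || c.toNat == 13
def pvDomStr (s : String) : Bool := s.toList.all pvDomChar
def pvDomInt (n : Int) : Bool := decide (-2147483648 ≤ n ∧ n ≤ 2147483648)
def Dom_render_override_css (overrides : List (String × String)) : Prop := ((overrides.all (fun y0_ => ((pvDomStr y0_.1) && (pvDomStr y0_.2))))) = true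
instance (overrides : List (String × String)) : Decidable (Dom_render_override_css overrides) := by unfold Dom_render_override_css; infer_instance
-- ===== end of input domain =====

-- B replaces A's two emit loops with a mutable seen-set by a rank-table sort of the known
-- keys plus a filter for the rest (idiomatic single pipeline); equal output proved on dicts
-- (lists with pairwise-distinct keys).


-- the fixed stable key order (A's local `order`; B's module constant `_ORDER`)
def orderList : List String := [
  "--color-primary", "--color-primary-text",
  "--color-bg", "--color-bg-alt",
  "--color-text", "--color-muted", "--color-border",
  "--color-link", "--color-link-hover",
  "--font-display", "--font-body",
  "--type-scale-h1", "--type-scale-h2", "--type-scale-h3",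
  "--type-scale-h4", "--type-scale-h5", "--type-scale-h6",
  "--type-scale-body",
  "--type-weight-display", "--type-weight-body",
  "--type-leading-tight", "--type-leading-normal",
  "--type-tracking-tight", "--type-tracking-normal",
  "--spacing-section",
  "--radius-md", "--radius-lg",
  "--button-bg", "--button-text",
  "--button-radius", "--button-padding-x", "--button-padding-y",
  "--button-font-weight", "--button-text-transform",
  "--button-letter-spacing",
  "--nav-bg", "--nav-text", "--nav-link-color",
  "--hero-overlay-color", "--hero-text-color",
  "--footer-bg", "--footer-text"]

def emptyCss : String := "/* No per-site overrides — neutral template defaults stand. */\n:root {}\n"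

def headerLines : List String := [
  "/* Auto-generated by agent.astro_tokens — derived from captured styles.json. */",
  "/* Variables NOT listed here keep their value from tokens.css (neutral defaults). */",
  ":root {"]

-- f"  {k}: {v};"
def cssLine (k v : String) : String := "  " ++ k ++ ": " ++ v ++ ";"

-- ===== PORT A =====
def render_override_css (overrides : List (String × String)) : String :=
  let d := PySem.Dict.mk overrides
  if overrides.isEmpty then emptyCss
  else
    let lines := headerLines
    -- for key in order: if key in overrides: lines.append(...); seen.add(key)
    let st := orderList.foldl
      (fun (st : List String × PySem.Set String) key =>
        if d.contains key then
          (st.1 ++ [cssLine key (d.getD key "")], PySem.Set.add st.2 key)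
        else st)
      (lines, PySem.Set.empty)
    -- for k, v in overrides.items(): if k in seen: continue; lines.append(...)
    let lines := overrides.foldl
      (fun acc kv => if PySem.Set.contains st.2 kv.1 then acc else acc ++ [cssLine kv.1 kv.2])
      st.1
    PySem.Str.join "\n" (lines ++ ["}"] ++ [""])

-- ===== PORT B =====
def render_override_css_alt (overrides : List (String × String)) : String :=
  if overrides.isEmpty then emptyCss
  else
    let d := PySem.Dict.mk overrides
    -- rank = {k: i for i, k in enumerate(_ORDER)}
    let rank := (PySem.List.enumerate orderList).foldl
      (fun (r : PySem.Dict String Int) ik => r.insert ik.2 ik.1) PySem.Dict.empty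
    -- known = sorted((k for k in overrides if k in rank), key=rank.__getitem__)
    let known := PySem.List.sorted
      ((overrides.map Prod.fst).filter (fun k => rank.contains k))
      (fun k => rank.getD k 0) false
    -- rest = [k for k in overrides if k not in rank]
    let rest := (overrides.map Prod.fst).filter (fun k => !(rank.contains k))
    let body := (known ++ rest).map (fun k => cssLine k (d.getD k ""))
    PySem.Str.join "\n" (headerLines ++ body ++ ["}", ""])

-- ===== PRECONDITION & SPEC =====
-- Pre_ states the invariant of the dict encoding: a Python dict's keys are pairwise
-- distinct, so association lists with duplicate keys encode no dict A can receive.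
def Pre_render_override_css (overrides : List (String × String)) : Prop :=
  (overrides.map Prod.fst).Nodup
instance (overrides : List (String × String)) : Decidable (Pre_render_override_css overrides) := by unfold Pre_render_override_css; infer_instance

def pvWitness_render_override_css : (List (String × String)) :=
  [("--color-bg", "#fff"), ("--zzz", "7px"), ("--color-primary", "red")]

def Spec_render_override_css (overrides : List (String × String)) (out : String) : Prop := out = render_override_css_alt overrides
instance (overrides : List (String × String)) (out : String) : Decidable (Spec_render_override_css overrides out) := by unfold Spec_render_override_css; infer_instance

-- ===== CLAIM (what is proved, stated in full; the proofs are below) =====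
def Claim_equal_render_override_css : Prop := ∀ (overrides : List (String × String)), Dom_render_override_css overrides → Pre_render_override_css overrides → Spec_render_override_css overrides (render_override_css overrides)

-- ===== LEMMAS AND PROOFS =====

-- proof-only name for B's rank table {k: i for i, k in enumerate(order)}
def rankD : PySem.Dict String Int :=
  (PySem.List.enumerate orderList).foldl (fun r ik => r.insert ik.2 ik.1) PySem.Dict.empty

set_option maxHeartbeats 2000000 in
set_option maxRecDepth 40000 in
theorem order_nodup : orderList.Nodup := by decide

set_option maxHeartbeats 2000000 in
set_option maxRecDepth 40000 in
theorem order_pairwise : orderList.Pairwise (fun a b => rankD.getD a 0 < rankD.getD b 0) := by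
  decide

theorem rank_contains (k : String) : rankD.contains k = true ↔ k ∈ orderList := by
  rw [PySem.Dict.contains_iff_mem_keys]
  unfold rankD
  have h := PySem.Dict.keys_foldl_insert_key (ν := Int) (PySem.List.enumerate orderList)
    (fun ik => ik.2) (fun _ ik => ik.1) PySem.Dict.empty
  simp only [] at h
  rw [h, PySem.Dict.keys_empty, PySem.List.map_snd_enumerate]
  constructor
  · intro hm; exact ((PySem.Set.mem_update _ _ _).1 hm).resolve_left (by simp)
  · intro hm; exact (PySem.Set.mem_update _ _ _).2 (Or.inr hm)

theorem dict_contains_iff (ov : List (String × String)) (k : String) :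
    (PySem.Dict.mk ov).contains k = true ↔ k ∈ ov.map Prod.fst := by
  simp [PySem.Dict.contains_mk, List.any_eq_true, List.mem_map]

-- ===== VERDICT (by name: the statement is the Claim_ definition above) =====
theorem render_override_css_spec : Claim_equal_render_override_css := by
  intro ov _hdom hpre
  unfold Spec_render_override_css render_override_css render_override_css_alt
  by_cases hov : ov.isEmpty
  · simp [hov]
  · simp only [hov, if_false, Bool.false_eq_true]
    rw [show (List.foldl (fun (r : PySem.Dict String Int) ik => r.insert ik.2 ik.1)
          PySem.Dict.empty (PySem.List.enumerate orderList)) = rankD from rfl]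
    set d := PySem.Dict.mk ov with hd
    -- A, loop 1: split the (lines, seen) pair into two independent folds
    have hpair : (fun (st : List String × PySem.Set String) key =>
        if d.contains key = true then
          (st.1 ++ [cssLine key (d.getD key "")], PySem.Set.add st.2 key)
        else st)
        = fun (st : List String × PySem.Set String) key =>
          ((fun acc k => if d.contains k = true then acc ++ [cssLine k (d.getD k "")] else acc) st.1 key,
           (fun s k => if d.contains k = true then PySem.Set.add s k else s) st.2 key) := by
      funext st key; dsimp only; split <;> rfl
    rw [hpair, PySem.List.foldl_prod_mk
          (f := fun acc k => if d.contains k = true then acc ++ [cssLine k (d.getD k "")] else acc)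
          (g := fun s k => if d.contains k = true then PySem.Set.add s k else s),
        PySem.List.foldl_append_if, PySem.List.foldl_if_eq_foldl_filter]
    dsimp only
    rw [show (PySem.Set.empty : PySem.Set String) = ([] : PySem.Set String) from rfl,
        ← PySem.Set.ofList_eq_foldl]
    set seen := PySem.Set.ofList (orderList.filter (fun k => d.contains k)) with hseen
    -- A, loop 2: 'if k in seen: continue' is an append guarded by the negation
    have hflip : (fun (acc : List String) (kv : String × String) =>
        if seen.contains kv.1 = true then acc else acc ++ [cssLine kv.1 kv.2])
        = fun acc kv =>
          if (!seen.contains kv.1) = true then acc ++ [cssLine kv.1 kv.2] else acc := by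
      funext acc kv; dsimp only; cases seen.contains kv.1 <;> simp
    rw [hflip, PySem.List.foldl_append_if]
    -- key facts about membership
    have hkeys : d.keys = ov.map Prod.fst := PySem.Dict.keys_mk ov
    have hseenc : ∀ x : String, seen.contains x = true ↔ (x ∈ orderList ∧ d.contains x = true) := by
      intro x
      rw [PySem.Set.contains_iff, hseen, PySem.Set.mem_ofList, List.mem_filter]
    -- B's sorted known keys are exactly A's first pass, in order
    have hknown : PySem.List.sorted ((ov.map Prod.fst).filter (fun k => rankD.contains k))
        (fun k => rankD.getD k 0)
        = orderList.filter (fun k => d.contains k) := by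
      apply PySem.List.sorted_eq_of_perm_of_pairwise_lt
      · rw [List.perm_ext_iff_of_nodup ((order_nodup).filter _) (hpre.filter _)]
        intro k
        simp only [List.mem_filter]
        rw [dict_contains_iff, rank_contains]
        tauto
      · exact (order_pairwise).filter _
    rw [hknown]
    -- B's rest keys are exactly A's second pass
    have hrest : ((ov.map Prod.fst).filter (fun k => !rankD.contains k)).map
          (fun k => cssLine k (d.getD k ""))
        = ((ov.filter (fun kv => !seen.contains kv.1)).map (fun kv => cssLine kv.1 kv.2)) := by
      rw [List.filter_map, List.map_map]
      have hfc : ov.filter ((fun k => !rankD.contains k) ∘ Prod.fst)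
          = ov.filter (fun kv => !seen.contains kv.1) := by
        apply List.filter_congr
        intro kv hkv
        have hdc : d.contains kv.1 = true :=
          (dict_contains_iff ov kv.1).2 (List.mem_map_of_mem hkv)
        simp only [Function.comp]
        by_cases hmem : kv.1 ∈ orderList
        · rw [(rank_contains kv.1).2 hmem, ((hseenc kv.1).2 ⟨hmem, hdc⟩)]
        · have h1 : rankD.contains kv.1 = false := by
            rw [Bool.eq_false_iff]; intro hc; exact hmem ((rank_contains kv.1).1 hc)
          have h2 : seen.contains kv.1 = false := by
            rw [Bool.eq_false_iff]; intro hc; exact hmem ((hseenc kv.1).1 hc).1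
          rw [h1, h2]
      rw [hfc]
      apply List.map_congr_left
      intro kv hkv
      have hov : kv ∈ ov := (List.mem_filter.1 hkv).1
      have : d.getD kv.1 "" = kv.2 := by
        apply PySem.Dict.getD_of_mem_items (d := d) (k := kv.1) (v := kv.2)
        · exact hov
        · rw [hkeys]; exact hpre
      simp only [Function.comp]
      rw [this]
    rw [List.map_append, hrest]
    congr 1
    simp [List.append_assoc]
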